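-- pv_equiv track=rewrite | github.com/kabirivan/TrainFullBatch_NeuralNetwork | main.py | post_ProcessLabels
-- ===== SOURCE A (Python) =====
-- gestures = ['noGesture', 'fist', 'waveIn', 'waveOut', 'open', 'pinch']
--
-- def unique(list1):
--     # insert the list to the set
--     list_set = set(list1)
--     # convert the set to the list
--     unique_list = (list(list_set))
--
--     return unique_list
--
-- def majorite_vote(data, before, after):
--
--     votes =[0,0,0,0,0,0]
--     class_maj = []
--
--     for j in range(0,len(data)):
--         wind_mv = data[max(0,(j-before)):min(len(data),(j+after))]
--
--         for k in range(0, len(gestures)):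
--             a = [1 if i == k+1 else 0 for i in wind_mv]
--             votes[k] = sum(a)
--
--         findNumber = lambda x, xs: [i for (y, i) in zip(xs, range(len(xs))) if x == y]
--         idx_label = findNumber(max(votes),votes)
--         class_maj.append( idx_label[0] + 1)
--
--
--     return class_maj
--
-- def post_ProcessLabels(predicted_Seq):
--
--     vec = predicted_Seq.copy()
--     pred = majorite_vote(vec, 4, 4)
--     predictions = pred.copy()
--     predictions[0] = 1
--     postProcessed_Labels = predictions.copy()
--
--     for i in range(1,len(predictions)):
--
--         if predictions[i] == predictions[i-1]:
--             cond = 1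
--         else:
--             cond = 0
--
--         postProcessed_Labels[i] =  (1 * cond) + (predictions[i]* (1 - cond))
--
--     uniqueLabels = unique(postProcessed_Labels)
--
--     an_iterator = filter(lambda number: number != 1, uniqueLabels)
--     uniqueLabelsWithoutRest = list(an_iterator)
--
--     if not uniqueLabelsWithoutRest:
--
--         finalLabel = 1
--
--     else:
--
--         if len(uniqueLabelsWithoutRest) > 1:
--             finalLabel = uniqueLabelsWithoutRest[0]
--
--         else:
--             finalLabel = uniqueLabelsWithoutRest[0]
--
--
--     return finalLabel, pred
-- ===== SOURCE B (Python) =====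
-- # Incremental sliding-window vote counts + single-pass min-smoothing; avoids re-slicing/recounting per index.
-- def post_ProcessLabels(predicted_Seq):
--     n = len(predicted_Seq)
--     counts = [0] * 7
--     for v in predicted_Seq[:4]:
--         if 1 <= v <= 6:
--             counts[v] += 1
--     pred = []
--     for j in range(n):
--         best = 1
--         for c in range(2, 7):
--             if counts[c] > counts[best]:
--                 best = c
--         pred.append(best)
--         if j + 4 < n:
--             v = predicted_Seq[j + 4]
--             if 1 <= v <= 6:
--                 counts[v] += 1
--         if j - 4 >= 0:
--             v = predicted_Seq[j - 4]
--             if 1 <= v <= 6: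
--                 counts[v] -= 1
--     final = 1
--     prev = 1
--     for cur in pred[1:]:
--         post = 1 if cur == prev else cur
--         if post != 1 and (final == 1 or post < final):
--             final = post
--         prev = cur
--     return final, pred
-- ===== Notes on version B (the rewrite author's own statement) =====
-- stated objective: faster
-- what changed: B replaces the per-index window re-slicing and six-fold recounting (plus the set/filter relabel scan) with an incremental sliding count array updated O(1) per step, a first-argmax scan over classes 1..6, and a single fused pass that smooths consecutive duplicates and tracks the minimum non-rest label directly.
-- crash fix: On the empty list A raises IndexError at predictions[0] = 1; B returns (1, []). — e.g. on post_ProcessLabels([]): A raises IndexError, B returns (1, [])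
import Mathlib
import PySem

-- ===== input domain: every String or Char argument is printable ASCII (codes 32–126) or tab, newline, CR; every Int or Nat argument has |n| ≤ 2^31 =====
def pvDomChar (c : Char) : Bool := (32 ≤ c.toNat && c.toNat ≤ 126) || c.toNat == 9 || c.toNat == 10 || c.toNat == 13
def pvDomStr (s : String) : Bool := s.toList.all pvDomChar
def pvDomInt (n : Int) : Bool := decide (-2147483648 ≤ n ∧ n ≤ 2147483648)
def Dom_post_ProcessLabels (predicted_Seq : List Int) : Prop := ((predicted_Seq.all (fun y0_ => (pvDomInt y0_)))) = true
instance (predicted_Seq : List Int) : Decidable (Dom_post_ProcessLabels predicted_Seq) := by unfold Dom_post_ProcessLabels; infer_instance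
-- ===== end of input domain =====

-- B replaces the per-index window re-slicing/recounting with an incremental sliding count
-- array and a single fused smoothing-and-minimum pass (objective: faster by a constant factor).

-- ===== PORT A =====
def pvGestures : List String := ["noGesture", "fist", "waveIn", "waveOut", "open", "pinch"]

-- unique(list1) = list(set(list1)), ported by hand: a CPython set of small non-negative ints
-- (hash(i) = i, all values here are class labels in 1..6 < table size) iterates in ascending
-- order, so list(set(xs)) is the ascending list of distinct members — exact on every list this
-- helper is applied to (postProcessed_Labels always has elements in 1..6).
def pvUnique (list1 : List Int) : List Int :=
  (PySem.List.pyRange 0 8 1).filter (fun c => list1.contains c)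

def pvFindNumber (x : Int) (xs : List Int) : List Int :=
  ((xs.zip (PySem.List.pyRange 0 xs.length 1)).filter (fun p => x == p.1)).map (·.2)

-- votes is reassigned in full (all six entries) on every j, so it is the per-iteration list;
-- class_maj is the fold state.
def majorite_vote (data : List Int) (before after : Int) : List Int :=
  (List.range data.length).foldl (fun class_maj (j : Nat) =>
    let wind_mv := PySem.List.slice data (some (max 0 ((j : Int) - before)))
                      (some (min (data.length : Int) ((j : Int) + after)))
    let votes := (List.range pvGestures.length).foldl (fun votes k =>
        votes.set k ((wind_mv.map (fun i => if i == (k : Int) + 1 then (1 : Int) else 0)).sum))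
      [0, 0, 0, 0, 0, 0]
    let idx_label := pvFindNumber ((PySem.List.max? votes (fun x => x)).getD 0) votes
    class_maj ++ [idx_label.headD 0 + 1]) []   -- idx_label[0]: nonempty since max(votes) ∈ votes

def post_ProcessLabels (predicted_Seq : List Int) : Int × List Int :=
  let vec := predicted_Seq
  let pred := majorite_vote vec 4 4
  let predictions := pred.set 0 1    -- predictions[0] = 1: IndexError on [] → excluded by Pre_
  let postProcessed_Labels := (List.range' 1 (predictions.length - 1)).foldl
    (fun post i =>
      let cond : Int := if predictions.getD i 0 == predictions.getD (i - 1) 0 then 1 else 0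
      post.set i (1 * cond + predictions.getD i 0 * (1 - cond))) predictions
  let uniqueLabels := pvUnique postProcessed_Labels
  let uniqueLabelsWithoutRest := uniqueLabels.filter (fun number => !(number == 1))
  let finalLabel : Int :=
    if uniqueLabelsWithoutRest.isEmpty then 1
    else if uniqueLabelsWithoutRest.length > 1 then uniqueLabelsWithoutRest.headD 1
    else uniqueLabelsWithoutRest.headD 1
  (finalLabel, pred)

-- ===== PORT B =====
def post_ProcessLabels_alt (predicted_Seq : List Int) : Int × List Int :=
  let n := predicted_Seq.length
  let counts0 := (predicted_Seq.take 4).foldl (fun counts v =>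
      if 1 ≤ v ∧ v ≤ 6 then counts.set v.toNat (counts.getD v.toNat 0 + 1) else counts)
    [0, 0, 0, 0, 0, 0, 0]
  let st := (List.range n).foldl (fun (st : List Int × List Int) j =>
      let counts := st.1
      let best := (List.range' 2 5).foldl (fun best c =>
          if counts.getD c 0 > counts.getD best 0 then c else best) 1
      let pred := st.2 ++ [(best : Int)]
      let counts := if j + 4 < n then
          let v := predicted_Seq.getD (j + 4) 0
          if 1 ≤ v ∧ v ≤ 6 then counts.set v.toNat (counts.getD v.toNat 0 + 1) else counts
        else counts
      let counts := if 4 ≤ j then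
          let v := predicted_Seq.getD (j - 4) 0
          if 1 ≤ v ∧ v ≤ 6 then counts.set v.toNat (counts.getD v.toNat 0 - 1) else counts
        else counts
      (counts, pred)) (counts0, [])
  let pred := st.2
  let fp := (pred.drop 1).foldl (fun (fp : Int × Int) cur =>
      let post : Int := if cur == fp.2 then 1 else cur
      let final := if post ≠ 1 ∧ (fp.1 = 1 ∨ post < fp.1) then post else fp.1
      (final, cur)) (1, 1)
  (fp.1, pred)

-- ===== PRECONDITION & SPEC =====
-- Pre_ excludes only the empty list, on which A raises IndexError at predictions[0] = 1.
def Pre_post_ProcessLabels (predicted_Seq : List Int) : Prop := predicted_Seq ≠ []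
instance (predicted_Seq : List Int) : Decidable (Pre_post_ProcessLabels predicted_Seq) := by
  unfold Pre_post_ProcessLabels; infer_instance

def pvWitness_post_ProcessLabels : List Int := [2, 7, 2]

-- On the empty list A raises IndexError at predictions[0] = 1; B returns (1, []).
def Raises_post_ProcessLabels (predicted_Seq : List Int) : Prop := predicted_Seq = []
instance (predicted_Seq : List Int) : Decidable (Raises_post_ProcessLabels predicted_Seq) := by
  unfold Raises_post_ProcessLabels; infer_instance
def pvRaiseWitness_post_ProcessLabels : List Int := []
def pvRaiseWitnessOut_post_ProcessLabels : Int × List Int := (1, [])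

def Spec_post_ProcessLabels (predicted_Seq : List Int) (out : Int × List Int) : Prop :=
  out = post_ProcessLabels_alt predicted_Seq
instance (predicted_Seq : List Int) (out : Int × List Int) :
    Decidable (Spec_post_ProcessLabels predicted_Seq out) := by
  unfold Spec_post_ProcessLabels; infer_instance

-- ===== CLAIM (what is proved, stated in full; the proofs are below) =====
def Claim_equal_post_ProcessLabels : Prop := ∀ (predicted_Seq : List Int),
  Dom_post_ProcessLabels predicted_Seq → Pre_post_ProcessLabels predicted_Seq →
  Spec_post_ProcessLabels predicted_Seq (post_ProcessLabels predicted_Seq)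

def Claim_raises_post_ProcessLabels : Prop :=
  (∀ (predicted_Seq : List Int), Dom_post_ProcessLabels predicted_Seq →
      Raises_post_ProcessLabels predicted_Seq → ¬ Pre_post_ProcessLabels predicted_Seq) ∧
  (Dom_post_ProcessLabels pvRaiseWitness_post_ProcessLabels ∧
   Raises_post_ProcessLabels pvRaiseWitness_post_ProcessLabels ∧
   post_ProcessLabels_alt pvRaiseWitness_post_ProcessLabels = pvRaiseWitnessOut_post_ProcessLabels)

-- ===== LEMMAS AND PROOFS =====

def pvCnt (w : List Int) (c : Int) : Int := (w.map (fun i => if i == c then (1 : Int) else 0)).sum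
def pvWin (xs : List Int) (j : Nat) : List Int :=
  (xs.drop (j - 4)).take (min xs.length (j + 4) - (j - 4))
def pvIdx (xs : List Int) (c : Int) (i : Nat) : Int := if xs.getD i 0 == c then 1 else 0
def pvS (xs : List Int) (c : Int) (a k : Nat) : Int := ((List.range' a k).map (pvIdx xs c)).sum

theorem pv_drop_take_map (xs : List Int) (a k : Nat) (h : a + k ≤ xs.length) :
    (xs.drop a).take k = (List.range' a k).map (fun i => xs.getD i 0) := by
  apply List.ext_getElem
  · simp; omega
  · intro i h1 h2
    simp only [List.getElem_take, List.getElem_drop, List.getElem_map, List.getElem_range', one_mul]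
    have hlt : a + i < xs.length := by simp at h1; omega
    rw [List.getD_eq_getElem xs 0 hlt]

theorem pv_cnt_S (xs : List Int) (c : Int) (j : Nat) (hj : j ≤ xs.length + 4) :
    pvCnt (pvWin xs j) c = pvS xs c (j - 4) (min xs.length (j + 4) - (j - 4)) := by
  rw [pvCnt, pvWin, pv_drop_take_map xs _ _ (by omega), pvS, List.map_map]
  rfl

theorem pv_S_concat (xs : List Int) (c : Int) (a k : Nat) :
    pvS xs c a (k + 1) = pvS xs c a k + pvIdx xs c (a + k) := by
  rw [pvS, pvS, List.range'_concat, List.map_append, List.sum_append]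
  simp

theorem pv_S_succ (xs : List Int) (c : Int) (a k : Nat) :
    pvS xs c a (k + 1) = pvIdx xs c a + pvS xs c (a + 1) k := by
  rw [pvS, pvS, List.range'_succ]
  simp

theorem pv_cnt_shift (xs : List Int) (c : Int) (j : Nat) (hj : j < xs.length) :
    pvCnt (pvWin xs (j + 1)) c = pvCnt (pvWin xs j) c
      + (if j + 4 < xs.length then pvIdx xs c (j + 4) else 0)
      - (if 4 ≤ j then pvIdx xs c (j - 4) else 0) := by
  rw [pv_cnt_S xs c j (by omega), pv_cnt_S xs c (j+1) (by omega)]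
  by_cases h4 : j + 4 < xs.length <;> by_cases hb : 4 ≤ j
  · -- both: widths 8
    rw [if_pos h4, if_pos hb]
    have e1 : min xs.length (j + 4) - (j - 4) = 8 := by omega
    have e2 : min xs.length (j + 1 + 4) - (j + 1 - 4) = 8 := by omega
    have e3 : j + 1 - 4 = (j - 4) + 1 := by omega
    rw [e1, e2, e3]
    have h9 := pv_S_concat xs c (j - 4) 8
    have h9' := pv_S_succ xs c (j - 4) 8
    have ha : j - 4 + 8 = j + 4 := by omega
    rw [ha] at h9
    omega
  · -- add only
    rw [if_pos h4, if_neg hb]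
    have e1 : min xs.length (j + 4) - (j - 4) = j + 4 := by omega
    have e2 : min xs.length (j + 1 + 4) - (j + 1 - 4) = (j + 4) + 1 := by omega
    have e3 : j + 1 - 4 = 0 := by omega
    have e4 : j - 4 = 0 := by omega
    rw [e1, e2, e3, e4]
    have h9 := pv_S_concat xs c 0 (j + 4)
    simp only [Nat.zero_add] at h9
    omega
  · -- sub only
    rw [if_neg h4, if_pos hb]
    have e1 : min xs.length (j + 4) - (j - 4) = xs.length - (j - 4) := by omega
    have e2 : min xs.length (j + 1 + 4) - (j + 1 - 4) = xs.length - (j - 3) := by omega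
    have e3 : j + 1 - 4 = j - 3 := by omega
    rw [e1, e2, e3]
    have e4 : xs.length - (j - 4) = (xs.length - (j - 3)) + 1 := by omega
    rw [e4]
    have h9 := pv_S_succ xs c (j - 4) (xs.length - (j - 3))
    have e5 : j - 4 + 1 = j - 3 := by omega
    rw [e5] at h9
    omega
  · -- neither
    rw [if_neg h4, if_neg hb]
    have e1 : min xs.length (j + 4) - (j - 4) = xs.length := by omega
    have e2 : min xs.length (j + 1 + 4) - (j + 1 - 4) = xs.length := by omega
    have e3 : j + 1 - 4 = 0 := by omega
    have e4 : j - 4 = 0 := by omega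
    rw [e1, e2, e3, e4]
    omega
def pvVec (xs : List Int) (j : Nat) : List Int :=
  [0, pvCnt (pvWin xs j) 1, pvCnt (pvWin xs j) 2, pvCnt (pvWin xs j) 3,
      pvCnt (pvWin xs j) 4, pvCnt (pvWin xs j) 5, pvCnt (pvWin xs j) 6]

theorem pv_addAt (c1 c2 c3 c4 c5 c6 v : Int) :
    (if 1 ≤ v ∧ v ≤ 6 then
        ([0, c1, c2, c3, c4, c5, c6] : List Int).set v.toNat
          (([0, c1, c2, c3, c4, c5, c6] : List Int).getD v.toNat 0 + 1)
      else [0, c1, c2, c3, c4, c5, c6])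
    = [0, c1 + (if v == 1 then 1 else 0), c2 + (if v == 2 then 1 else 0),
          c3 + (if v == 3 then 1 else 0), c4 + (if v == 4 then 1 else 0),
          c5 + (if v == 5 then 1 else 0), c6 + (if v == 6 then 1 else 0)] := by
  by_cases hv : 1 ≤ v ∧ v ≤ 6
  · rw [if_pos hv]
    obtain ⟨h1, h2⟩ := hv
    interval_cases v <;> simp [List.set]
  · rw [if_neg hv]
    have hne : ∀ w : Int, 1 ≤ w → w ≤ 6 → v ≠ w := by intro w h1 h2 he; omega
    simp [beq_iff_eq, hne 1 (by norm_num) (by norm_num), hne 2 (by norm_num) (by norm_num),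
      hne 3 (by norm_num) (by norm_num), hne 4 (by norm_num) (by norm_num),
      hne 5 (by norm_num) (by norm_num), hne 6 (by norm_num) (by norm_num)]

theorem pv_subAt (c1 c2 c3 c4 c5 c6 v : Int) :
    (if 1 ≤ v ∧ v ≤ 6 then
        ([0, c1, c2, c3, c4, c5, c6] : List Int).set v.toNat
          (([0, c1, c2, c3, c4, c5, c6] : List Int).getD v.toNat 0 - 1)
      else [0, c1, c2, c3, c4, c5, c6])
    = [0, c1 - (if v == 1 then 1 else 0), c2 - (if v == 2 then 1 else 0),
          c3 - (if v == 3 then 1 else 0), c4 - (if v == 4 then 1 else 0),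
          c5 - (if v == 5 then 1 else 0), c6 - (if v == 6 then 1 else 0)] := by
  by_cases hv : 1 ≤ v ∧ v ≤ 6
  · rw [if_pos hv]
    obtain ⟨h1, h2⟩ := hv
    interval_cases v <;> simp [List.set]
  · rw [if_neg hv]
    have hne : ∀ w : Int, 1 ≤ w → w ≤ 6 → v ≠ w := by intro w h1 h2 he; omega
    simp [beq_iff_eq, hne 1 (by norm_num) (by norm_num), hne 2 (by norm_num) (by norm_num),
      hne 3 (by norm_num) (by norm_num), hne 4 (by norm_num) (by norm_num),
      hne 5 (by norm_num) (by norm_num), hne 6 (by norm_num) (by norm_num)]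

theorem pv_vec_shift (xs : List Int) (j : Nat) (hj : j < xs.length) :
    (let counts := pvVec xs j
     let counts1 := if j + 4 < xs.length then
         (let v := xs.getD (j + 4) 0
          if 1 ≤ v ∧ v ≤ 6 then counts.set v.toNat (counts.getD v.toNat 0 + 1) else counts)
       else counts
     if 4 ≤ j then
         (let v := xs.getD (j - 4) 0
          if 1 ≤ v ∧ v ≤ 6 then counts1.set v.toNat (counts1.getD v.toNat 0 - 1) else counts1)
       else counts1)
    = pvVec xs (j + 1) := by
  simp only [pvVec]
  by_cases h4 : j + 4 < xs.length <;> by_cases hb : 4 ≤ j <;>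
    simp only [if_pos, if_neg, h4, hb, if_true, if_false, pv_addAt, pv_subAt] <;>
    simp only [pv_cnt_shift xs 1 j (by omega), pv_cnt_shift xs 2 j (by omega),
      pv_cnt_shift xs 3 j (by omega), pv_cnt_shift xs 4 j (by omega),
      pv_cnt_shift xs 5 j (by omega), pv_cnt_shift xs 6 j (by omega), pvIdx, h4, hb,
      if_true, if_false, List.cons.injEq, and_true, true_and] <;>
    norm_num <;> omega

theorem pv_cnt_append (w : List Int) (x c : Int) :
    pvCnt (w ++ [x]) c = pvCnt w c + (if x == c then 1 else 0) := by
  simp [pvCnt]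

theorem pv_foldcnt (w : List Int) :
    w.foldl (fun counts v =>
        if 1 ≤ v ∧ v ≤ 6 then counts.set v.toNat (counts.getD v.toNat 0 + 1) else counts)
      [0, 0, 0, 0, 0, 0, 0]
    = [0, pvCnt w 1, pvCnt w 2, pvCnt w 3, pvCnt w 4, pvCnt w 5, pvCnt w 6] := by
  induction w using List.reverseRecOn with
  | nil => simp [pvCnt]
  | append_singleton w x ih =>
      rw [List.foldl_append, ih, List.foldl_cons, List.foldl_nil, pv_addAt]
      simp only [pv_cnt_append]

theorem pv_win_zero (xs : List Int) : pvWin xs 0 = xs.take 4 := by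
  rw [pvWin]
  simp only [Nat.zero_sub, List.drop_zero, Nat.sub_zero, Nat.zero_add]
  rw [min_comm, ← List.take_eq_take_min]

def pvPick (counts : List Int) : Nat :=
  (List.range' 2 5).foldl (fun best c =>
    if counts.getD c 0 > counts.getD best 0 then c else best) 1
def pvF (xs : List Int) (j : Nat) : Int := (pvPick (pvVec xs j) : Int)

def pvBstep (xs : List Int) (st : List Int × List Int) (j : Nat) : List Int × List Int :=
  let counts := st.1
  let best := (List.range' 2 5).foldl (fun best c =>
      if counts.getD c 0 > counts.getD best 0 then c else best) 1
  let pred := st.2 ++ [(best : Int)]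
  let counts := if j + 4 < xs.length then
      let v := xs.getD (j + 4) 0
      if 1 ≤ v ∧ v ≤ 6 then counts.set v.toNat (counts.getD v.toNat 0 + 1) else counts
    else counts
  let counts := if 4 ≤ j then
      let v := xs.getD (j - 4) 0
      if 1 ≤ v ∧ v ≤ 6 then counts.set v.toNat (counts.getD v.toNat 0 - 1) else counts
    else counts
  (counts, pred)

theorem pv_bstep_eq (xs : List Int) (acc : List Int) (j : Nat) (hj : j < xs.length) :
    pvBstep xs (pvVec xs j, acc) j = (pvVec xs (j + 1), acc ++ [pvF xs j]) := by
  rw [pvBstep]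
  have h := pv_vec_shift xs j hj
  refine Prod.ext ?_ rfl
  exact h

theorem pv_bloop (xs : List Int) : ∀ (k j : Nat) (acc : List Int), j + k = xs.length →
    ((List.range' j k).foldl (pvBstep xs) (pvVec xs j, acc)).2
      = acc ++ (List.range' j k).map (pvF xs) := by
  intro k
  induction k with
  | zero => intro j acc h; simp
  | succ k ih =>
      intro j acc h
      rw [List.range'_succ, List.foldl_cons, List.map_cons,
        pv_bstep_eq xs acc j (by omega)]
      have := ih (j + 1) (acc ++ [pvF xs j]) (by omega)
      simpa using this

def pvMvRef (xs : List Int) : List Int := (List.range xs.length).map (pvF xs)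

theorem pv_headFilter (m v1 v2 v3 v4 v5 v6 : Int) :
    (pvFindNumber m [v1,v2,v3,v4,v5,v6]).headD 0 =
      (if m = v1 then 0 else if m = v2 then 1 else if m = v3 then 2 else
       if m = v4 then 3 else if m = v5 then 4 else if m = v6 then 5 else 0) := by
  simp only [pvFindNumber, List.length_cons, List.length_nil, List.zip, beq_iff_eq]
  have h : PySem.List.pyRange (0:Int) 6 1 = [0,1,2,3,4,5] := by decide
  split_ifs <;> simp_all [h]

set_option maxHeartbeats 1000000 in
theorem pv_argmax (v1 v2 v3 v4 v5 v6 : Int) :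
    (pvFindNumber ((PySem.List.max? [v1,v2,v3,v4,v5,v6] (fun x => x)).getD 0) [v1,v2,v3,v4,v5,v6]).headD 0 + 1
    = (pvPick [0,v1,v2,v3,v4,v5,v6] : Int) := by
  rw [pv_headFilter]
  simp only [PySem.List.max?_id_cons, List.foldl_cons, List.foldl_nil, Option.getD_some,
    pvPick, List.range'_succ, List.range'_zero,
    apply_ite (fun k => List.getD ([0,v1,v2,v3,v4,v5,v6] : List Int) k 0),
    apply_ite (fun k : Nat => (k : Int)), List.getD_cons_succ, List.getD_cons_zero]
  norm_num [List.getD]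
  split_ifs <;> omega

theorem pv_votes (w : List Int) :
    (List.range 6).foldl (fun votes k =>
        votes.set k ((w.map (fun i => if i == (k : Int) + 1 then (1 : Int) else 0)).sum))
      [0, 0, 0, 0, 0, 0]
    = [pvCnt w 1, pvCnt w 2, pvCnt w 3, pvCnt w 4, pvCnt w 5, pvCnt w 6] := by
  norm_num [List.range_succ, pvCnt]

theorem pv_slice_win (xs : List Int) (j : Nat) :
    PySem.List.slice xs (some (max 0 ((j : Int) - 4))) (some (min (xs.length : Int) ((j : Int) + 4)))
    = pvWin xs j := by
  have h1 : max 0 ((j : Int) - 4) = ((j - 4 : Nat) : Int) := by omega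
  have h2 : min (xs.length : Int) ((j : Int) + 4) = ((min xs.length (j + 4) : Nat) : Int) := by omega
  rw [h1, h2, PySem.List.slice_natCast, pvWin]

def pvAstep (xs : List Int) (j : Nat) : Int :=
  let wind_mv := PySem.List.slice xs (some (max 0 ((j : Int) - 4)))
                    (some (min (xs.length : Int) ((j : Int) + 4)))
  let votes := (List.range pvGestures.length).foldl (fun votes k =>
      votes.set k ((wind_mv.map (fun i => if i == (k : Int) + 1 then (1 : Int) else 0)).sum))
    [0, 0, 0, 0, 0, 0]
  let idx_label := pvFindNumber ((PySem.List.max? votes (fun x => x)).getD 0) votes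
  idx_label.headD 0 + 1

theorem pv_mv_eq (xs : List Int) : majorite_vote xs 4 4 = pvMvRef xs := by
  have h1 : majorite_vote xs 4 4 = (List.range xs.length).map (pvAstep xs) := by
    unfold majorite_vote
    show (List.range xs.length).foldl (fun acc j => acc ++ [pvAstep xs j]) [] = _
    rw [PySem.List.foldl_append_singleton_eq_map, List.nil_append]
  rw [h1, pvMvRef]
  refine List.map_congr_left ?_
  intro j _
  show pvAstep xs j = pvF xs j
  have hg : pvGestures.length = 6 := rfl
  simp only [pvAstep, hg, pv_slice_win, pv_votes]
  rw [pv_argmax]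
  rfl



def pvPostGo (prev : Int) : List Int → List Int
  | [] => []
  | x :: t => (if x == prev then 1 else x) :: pvPostGo x t

def pvMinFold (acc : Int) (l : List Int) : Int :=
  l.foldl (fun a x => if x ≠ 1 ∧ (a = 1 ∨ x < a) then x else a) acc

theorem pv_pick_bounds (l : List Int) : 1 ≤ pvPick l ∧ pvPick l ≤ 6 := by
  rw [pvPick]
  norm_num [List.range']
  split_ifs <;> omega

theorem pv_mvref_bounds (xs : List Int) : ∀ x ∈ pvMvRef xs, 1 ≤ x ∧ x ≤ 6 := by
  intro x hx
  rw [pvMvRef] at hx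
  obtain ⟨j, -, rfl⟩ := List.mem_map.mp hx
  have := pv_pick_bounds (pvVec xs j)
  rw [pvF]
  omega

theorem pv_go_bounds (t : List Int) : ∀ prev, (∀ x ∈ t, 1 ≤ x ∧ x ≤ 6) →
    ∀ y ∈ pvPostGo prev t, 1 ≤ y ∧ y ≤ 6 := by
  induction t with
  | nil => intro prev h y hy; simp [pvPostGo] at hy
  | cons x t ih =>
      intro prev h y hy
      rw [pvPostGo] at hy
      rcases List.mem_cons.mp hy with rfl | hyt
      · split_ifs with hc
        · omega
        · exact h x (by simp)
      · exact ih x (fun z hz => h z (by simp [hz])) y hyt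

-- B's final fold computes the running minimum of the smoothed tail
theorem pv_bfin (t : List Int) : ∀ (acc prev : Int),
    ((t.foldl (fun (fp : Int × Int) cur =>
        let post : Int := if cur == fp.2 then 1 else cur
        let final := if post ≠ 1 ∧ (fp.1 = 1 ∨ post < fp.1) then post else fp.1
        (final, cur)) (acc, prev)).1)
    = pvMinFold acc (pvPostGo prev t) := by
  induction t with
  | nil => intro acc prev; rfl
  | cons x t ih =>
      intro acc prev
      rw [List.foldl_cons, pvPostGo]
      rw [pvMinFold, List.foldl_cons, ← pvMinFold]
      exact ih _ x

theorem pv_minfold_spec (t : List Int) : ∀ (acc : Int),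
    (acc = 1 ∨ (2 ≤ acc ∧ acc ≤ 6)) → (∀ x ∈ t, 1 ≤ x ∧ x ≤ 6) →
    ((pvMinFold acc t = acc ∨ pvMinFold acc t ∈ t) ∧
     (pvMinFold acc t = 1 → acc = 1 ∧ ∀ x ∈ t, x = 1) ∧
     (pvMinFold acc t ≠ 1 → (acc ≠ 1 → pvMinFold acc t ≤ acc) ∧
        ∀ x ∈ t, x ≠ 1 → pvMinFold acc t ≤ x)) := by
  induction t with
  | nil => intro acc hacc hb; simp [pvMinFold]
  | cons x t ih =>
      intro acc hacc hb
      have hbx := hb x (by simp)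
      have hbt : ∀ y ∈ t, 1 ≤ y ∧ y ≤ 6 := fun y hy => hb y (by simp [hy])
      rw [pvMinFold, List.foldl_cons, ← pvMinFold]
      set a' := if x ≠ 1 ∧ (acc = 1 ∨ x < acc) then x else acc with ha'
      have ha'cases : (a' = 1 ∨ (2 ≤ a' ∧ a' ≤ 6)) := by
        rw [ha']; split_ifs <;> omega
      obtain ⟨h1, h2, h3⟩ := ih a' ha'cases hbt
      refine ⟨?_, ?_, ?_⟩
      · rcases h1 with h | h
        · rw [h, ha']; split_ifs with hc
          · right; simp
          · left; rfl
        · right; simp [h]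
      · intro hm
        obtain ⟨hA, hAll⟩ := h2 hm
        rw [ha'] at hA
        constructor
        · by_cases hc : x ≠ 1 ∧ (acc = 1 ∨ x < acc)
          · rw [if_pos hc] at hA; omega
          · rw [if_neg hc] at hA; exact hA
        · intro y hy
          rcases List.mem_cons.mp hy with rfl | hyt
          · by_cases hc : y ≠ 1 ∧ (acc = 1 ∨ y < acc)
            · rw [if_pos hc] at hA; omega
            · push_neg at hc
              by_contra hne
              rw [if_neg (by push_neg; omega)] at hA
              have := hc hne
              omega
          · exact hAll y hyt
      · intro hm
        obtain ⟨hle, hall⟩ := h3 hm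
        constructor
        · intro hacc1
          by_cases hc : x ≠ 1 ∧ (acc = 1 ∨ x < acc)
          · have := ha' ▸ if_pos hc
            have h4 : a' = x := by rw [ha', if_pos hc]
            by_cases hA1 : a' = 1
            · omega
            · have := hle hA1; omega
          · have h4 : a' = acc := by rw [ha', if_neg hc]
            by_cases hA1 : a' = 1
            · omega
            · have := hle hA1; omega
        · intro y hy hy1
          rcases List.mem_cons.mp hy with rfl | hyt
          · by_cases hc : y ≠ 1 ∧ (acc = 1 ∨ y < acc)
            · have h4 : a' = y := by rw [ha', if_pos hc]
              by_cases hA1 : a' = 1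
              · omega
              · have := hle hA1; omega
            · push_neg at hc
              have hya := hc hy1
              have h4 : a' = acc := by rw [ha', if_neg (by push_neg; omega)]
              by_cases hA1 : a' = 1
              · omega
              · have := hle hA1; omega
          · exact hall y hyt hy1

theorem pv_G (ys : List Int) (h : ∀ x ∈ ys, 1 ≤ x ∧ x ≤ 6) :
    (let u := (pvUnique ((1 : Int) :: ys)).filter (fun x => !(x == 1))
     if u.isEmpty then (1 : Int) else if u.length > 1 then u.headD 1 else u.headD 1)
    = pvMinFold 1 ys := by
  have hrange : PySem.List.pyRange (0:Int) 8 1 = [0,1,2,3,4,5,6,7] := by decide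
  have h0 : ((1 : Int) :: ys).contains 0 = false := by
    simp only [List.contains_cons, List.contains_eq_mem]
    norm_num
    intro hc
    have := h 0 hc
    omega
  have h7 : ((1 : Int) :: ys).contains 7 = false := by
    simp only [List.contains_cons, List.contains_eq_mem]
    norm_num
    intro hc
    have := h 7 hc
    omega
  have hcons : ∀ c : Int, c ≠ 1 → (((1 : Int) :: ys).contains c) = ys.contains c := by
    intro c hc
    simp only [List.contains_cons, List.contains_eq_mem]
    simp [beq_iff_eq, hc, Ne.symm hc]
  obtain ⟨hmem, hone, hmin⟩ := pv_minfold_spec ys 1 (by omega) h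
  set m := pvMinFold 1 ys with hm
  clear_value m
  simp only [pvUnique, hrange, List.filter_filter]
  simp only [List.filter_cons, List.filter_nil, h0, h7,
    hcons 2 (by norm_num), hcons 3 (by norm_num), hcons 4 (by norm_num),
    hcons 5 (by norm_num), hcons 6 (by norm_num)]
  norm_num
  by_cases hm1 : m = 1
  · obtain ⟨-, hall⟩ := hone hm1
    have hc : ∀ c : Int, c ≠ 1 → c ∉ ys := fun c hc1 hcm => hc1 (hall c hcm)
    simp [hc 2 (by norm_num), hc 3 (by norm_num), hc 4 (by norm_num), hc 5 (by norm_num),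
      hc 6 (by norm_num), hm1]
  · obtain ⟨-, hlow⟩ := hmin hm1
    have hmys : m ∈ ys := by
      rcases hmem with h' | h'
      · exact absurd h' hm1
      · exact h'
    have hmb := h m hmys
    have hlt : ∀ c : Int, c ≠ 1 → c < m → c ∉ ys := by
      intro c hc1 hcm hcmem
      have := hlow c hcmem hc1
      omega
    have hm2 : 2 ≤ m := by omega
    have hm6 : m ≤ 6 := by omega
    interval_cases m
    · simp [hmys]
    · simp [hlt 2 (by norm_num) (by omega), hmys]
    · simp [hlt 2 (by norm_num) (by omega), hlt 3 (by norm_num) (by omega), hmys]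
    · simp [hlt 2 (by norm_num) (by omega), hlt 3 (by norm_num) (by omega),
        hlt 4 (by norm_num) (by omega), hmys]
    · simp [hlt 2 (by norm_num) (by omega), hlt 3 (by norm_num) (by omega),
        hlt 4 (by norm_num) (by omega), hlt 5 (by norm_num) (by omega), hmys]

theorem pv_fold_set_length (g : Nat → Int) (l : List Nat) : ∀ (z : List Int),
    (l.foldl (fun post i => post.set i (g i)) z).length = z.length := by
  induction l with
  | nil => intro z; rfl
  | cons a l ih => intro z; rw [List.foldl_cons, ih]; simp

theorem pv_getD_set (z : List Int) (a : Nat) (v : Int) (i : Nat) :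
    (z.set a v).getD i 0 = if a = i ∧ i < z.length then v else z.getD i 0 := by
  rw [List.getD_eq_getElem?_getD, List.getD_eq_getElem?_getD, List.getElem?_set]
  split_ifs <;> simp_all [List.getElem?_eq_none_iff] <;> omega

theorem pv_fold_set_getD (g : Nat → Int) (l : List Nat) : ∀ (z : List Int) (i : Nat),
    (l.foldl (fun post i => post.set i (g i)) z).getD i 0
      = if i ∈ l ∧ i < z.length then g i else z.getD i 0 := by
  induction l with
  | nil => intro z i; simp
  | cons a l ih =>
      intro z i
      rw [List.foldl_cons, ih, pv_getD_set]
      simp only [List.length_set, List.mem_cons]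
      split_ifs <;> simp_all <;> omega

theorem pv_go_length (t : List Int) : ∀ prev, (pvPostGo prev t).length = t.length := by
  induction t with
  | nil => intro prev; rfl
  | cons x t ih => intro prev; simp [pvPostGo, ih]

theorem pv_go_getD (t : List Int) : ∀ (prev : Int) (i : Nat), i < t.length →
    (pvPostGo prev t).getD i 0
      = if t.getD i 0 == (if i = 0 then prev else t.getD (i - 1) 0) then 1 else t.getD i 0 := by
  induction t with
  | nil => intro prev i h; simp at h
  | cons x t ih =>
      intro prev i h
      match i with
      | 0 => simp [pvPostGo]
      | Nat.succ i' =>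
          rw [pvPostGo]
          simp only [List.getD_cons_succ]
          rw [ih x i' (by simpa using h)]
          match i' with
          | 0 => simp
          | Nat.succ i'' => simp

theorem pv_getD_cons_tail (y : Int) (l : List Int) (k : Nat) (hk : k ≠ 0) :
    ((y :: l) : List Int).getD k 0 = l.getD (k - 1) 0 := by
  match k with
  | 0 => exact absurd rfl hk
  | Nat.succ k' => simp

theorem pv_post_eq (x : Int) (t : List Int) :
    (List.range' 1 (((x :: t) : List Int).length - 1)).foldl
      (fun post i =>
        let cond : Int := if ((x :: t) : List Int).getD i 0 == ((x :: t) : List Int).getD (i - 1) 0 then 1 else 0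
        post.set i (1 * cond + ((x :: t) : List Int).getD i 0 * (1 - cond))) (x :: t)
    = x :: pvPostGo x t := by
  set q : List Int := x :: t with hq
  apply List.ext_getElem
  · rw [pv_fold_set_length]; simp [hq, pv_go_length]
  · intro i h1 h2
    rw [← List.getD_eq_getElem (d := 0), ← List.getD_eq_getElem (d := 0)]
    rw [pv_fold_set_getD]
    have hlen : q.length = t.length + 1 := by simp [hq]
    have hi : i < q.length := by rwa [pv_fold_set_length] at h1
    by_cases hi0 : i = 0
    · subst hi0
      rw [if_neg (by simp [List.mem_range'_1])]
      simp [hq]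
    · rw [if_pos ⟨List.mem_range'_1.mpr ⟨by omega, by omega⟩, hi⟩]
      have hi1 : i - 1 + 1 = i := by omega
      have hgd : q.getD i 0 = t.getD (i - 1) 0 := by
        rw [hq, pv_getD_cons_tail x t i hi0]
      have hgd2 : (x :: pvPostGo x t).getD i 0 = (pvPostGo x t).getD (i - 1) 0 :=
        pv_getD_cons_tail x (pvPostGo x t) i hi0
      rw [hgd2, pv_go_getD t x (i - 1) (by omega)]
      have hgd3 : q.getD (i - 1) 0 = if i - 1 = 0 then x else t.getD (i - 1 - 1) 0 := by
        by_cases h0 : i - 1 = 0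
        · simp [h0, hq]
        · rw [if_neg h0, hq, pv_getD_cons_tail x t (i - 1) h0]
      rw [hgd, hgd3]
      by_cases hc : t.getD (i - 1) 0 = (if i - 1 = 0 then x else t.getD (i - 1 - 1) 0)
      · rw [if_pos (by simpa using hc), if_pos (by simpa using hc)]; ring
      · rw [if_neg (by simpa using hc), if_neg (by simpa using hc)]; ring


theorem pv_A_eval (xs : List Int) (a : Int) (t : List Int) (hp : pvMvRef xs = a :: t) :
    post_ProcessLabels xs = (pvMinFold 1 (pvPostGo 1 t), a :: t) := by
  have hbt : ∀ x ∈ t, 1 ≤ x ∧ x ≤ 6 := by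
    intro x hx
    exact pv_mvref_bounds xs x (by rw [hp]; simp [hx])
  have hys : ∀ x ∈ pvPostGo 1 t, 1 ≤ x ∧ x ≤ 6 := pv_go_bounds t 1 hbt
  unfold post_ProcessLabels
  simp only [pv_mv_eq, hp, List.set_cons_zero]
  rw [pv_post_eq 1 t]
  simp only [Prod.mk.injEq]
  refine ⟨?_, trivial⟩
  exact pv_G (pvPostGo 1 t) hys

theorem pv_B_eval (xs : List Int) :
    post_ProcessLabels_alt xs
      = (pvMinFold 1 (pvPostGo 1 ((pvMvRef xs).drop 1)), pvMvRef xs) := by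
  have hst : ((List.range xs.length).foldl (pvBstep xs) (pvVec xs 0, ([] : List Int))).2
      = pvMvRef xs := by
    rw [List.range_eq_range']
    have := pv_bloop xs xs.length 0 [] (by omega)
    rw [pvMvRef, List.range_eq_range']
    simpa using this
  unfold post_ProcessLabels_alt
  rw [pv_foldcnt]
  have hc0 : ([0, pvCnt (xs.take 4) 1, pvCnt (xs.take 4) 2, pvCnt (xs.take 4) 3,
      pvCnt (xs.take 4) 4, pvCnt (xs.take 4) 5, pvCnt (xs.take 4) 6] : List Int)
      = pvVec xs 0 := by
    rw [pvVec, pv_win_zero]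
  rw [hc0]
  show (((((List.range xs.length).foldl (pvBstep xs) (pvVec xs 0, ([] : List Int))).2.drop 1).foldl
        (fun (fp : Int × Int) cur =>
          let post : Int := if cur == fp.2 then 1 else cur
          let final := if post ≠ 1 ∧ (fp.1 = 1 ∨ post < fp.1) then post else fp.1
          (final, cur)) (1, 1)).1,
      ((List.range xs.length).foldl (pvBstep xs) (pvVec xs 0, ([] : List Int))).2)
    = (pvMinFold 1 (pvPostGo 1 ((pvMvRef xs).drop 1)), pvMvRef xs)
  rw [hst]
  simp only [Prod.mk.injEq]
  exact ⟨pv_bfin ((pvMvRef xs).drop 1) 1 1, trivial⟩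


-- ===== VERDICT (by name: the statement is the Claim_ definition above) =====
theorem post_ProcessLabels_spec : Claim_equal_post_ProcessLabels := by
  intro xs hdom hpre
  show post_ProcessLabels xs = post_ProcessLabels_alt xs
  obtain ⟨a, t, hp⟩ : ∃ a t, pvMvRef xs = a :: t := by
    cases hmv : pvMvRef xs with
    | nil =>
        exfalso
        have hlen : xs.length = 0 := by
          have := congrArg List.length hmv
          simpa [pvMvRef] using this
        exact hpre (List.length_eq_zero_iff.mp hlen)
    | cons a t => exact ⟨a, t, rfl⟩
  rw [pv_A_eval xs a t hp, pv_B_eval xs, hp]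
  rfl

@[simp]
theorem post_ProcessLabels_raises : Claim_raises_post_ProcessLabels := by
  unfold Claim_raises_post_ProcessLabels
  exact ⟨fun _ _ h => by simp [Raises_post_ProcessLabels] at h; simp [Pre_post_ProcessLabels, h],
         by decide⟩
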